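-- pv_equiv track=rewrite | github.com/anjamarkovic/10zadataka | zadatak30.py | zbir_nekog_stepena_cifara
-- ===== SOURCE A (Python) =====
-- def zbir_nekog_stepena_cifara(n,k) :
--     """funkcija stepenuje cifre broja n na k-ti stepen i vraca njihov zbir"""
--
--     zbir=0
--     while True :
--         zbir=zbir + (n%10) ** k
--         n=n//10
--         if n==0 :
--             break
--     return zbir
-- ===== SOURCE B (Python) =====
-- def zbir_nekog_stepena_cifara(n, k):
--     """funkcija stepenuje cifre broja n na k-ti stepen i vraca njihov zbir"""
--     return sum(int(c) ** k for c in str(n))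
-- ===== Notes on version B (the rewrite author's own statement) =====
-- stated objective: idiomatic
-- what changed: B sums int(c)**k over the decimal string of n (most-significant-first, no mutable accumulator loop) instead of A's do-while peeling digits with %10 and //10 least-significant-first.
import Mathlib
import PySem

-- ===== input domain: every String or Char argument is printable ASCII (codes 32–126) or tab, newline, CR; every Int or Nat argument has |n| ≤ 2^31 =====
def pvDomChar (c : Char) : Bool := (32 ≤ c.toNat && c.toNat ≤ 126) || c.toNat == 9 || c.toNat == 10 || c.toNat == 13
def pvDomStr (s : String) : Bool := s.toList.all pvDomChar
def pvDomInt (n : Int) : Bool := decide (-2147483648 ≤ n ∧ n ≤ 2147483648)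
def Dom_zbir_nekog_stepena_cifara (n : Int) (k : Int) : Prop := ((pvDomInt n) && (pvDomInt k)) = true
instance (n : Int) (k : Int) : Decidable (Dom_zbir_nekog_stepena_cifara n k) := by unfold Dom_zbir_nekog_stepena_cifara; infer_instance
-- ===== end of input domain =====

-- B sums int(c)**k over the decimal string of n instead of A's do-while loop peeling
-- digits with %10 // 10 (idiomatic rewrite, same cost).

-- ===== PORT A =====
-- while True: zbir += (n%10)**k; n //= 10; if n==0: break — do-while, fuel n.toNat+1
-- (enough for all n ≥ 0; A loops forever on n < 0, excluded by Pre_).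
def zbirLoop (k : Int) (fuel : Nat) (n : Int) (zbir : Int) : Int :=
  match fuel with
  | 0 => zbir
  | fuel + 1 =>
    let zbir' := zbir + (PySem.Int.mod n 10) ^ k.toNat
    let n' := PySem.Int.floordiv n 10
    if n' = 0 then zbir' else zbirLoop k fuel n' zbir'

def zbir_nekog_stepena_cifara (n : Int) (k : Int) : Int :=
  zbirLoop k (n.toNat + 1) n 0

-- ===== PORT B =====
-- sum(int(c)**k for c in str(n)); int(c) on a digit char c is c.toNat - 48 (exact on Pre_,
-- where str(n) consists of digit chars only).
def zbir_nekog_stepena_cifara_alt (n : Int) (k : Int) : Int :=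
  (((PySem.Int.toStr n).toList).map (fun c => ((c.toNat : Int) - 48) ^ k.toNat)).sum

-- ===== PRECONDITION & SPEC =====
-- Pre_ excludes n < 0 (A's while-loop never terminates: n//10 stalls at -1) and k < 0
-- (Python ** then yields a float, or raises ZeroDivisionError on a 0 digit — no int value).
def Pre_zbir_nekog_stepena_cifara (n : Int) (k : Int) : Prop := 0 ≤ n ∧ 0 ≤ k
instance (n : Int) (k : Int) : Decidable (Pre_zbir_nekog_stepena_cifara n k) := by unfold Pre_zbir_nekog_stepena_cifara; infer_instance
def pvWitness_zbir_nekog_stepena_cifara : Int × Int := (123, 2)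

def Spec_zbir_nekog_stepena_cifara (n : Int) (k : Int) (out : Int) : Prop := out = zbir_nekog_stepena_cifara_alt n k
instance (n : Int) (k : Int) (out : Int) : Decidable (Spec_zbir_nekog_stepena_cifara n k out) := by unfold Spec_zbir_nekog_stepena_cifara; infer_instance

-- ===== CLAIM (what is proved, stated in full; the proofs are below) =====
def Claim_equal_zbir_nekog_stepena_cifara : Prop := ∀ (n : Int) (k : Int), Dom_zbir_nekog_stepena_cifara n k → Pre_zbir_nekog_stepena_cifara n k → Spec_zbir_nekog_stepena_cifara n k (zbir_nekog_stepena_cifara n k)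

-- ===== LEMMAS AND PROOFS =====

-- reference digit-power sum, least-significant first
def digitPowSum (k : Int) (m : Nat) : Int :=
  ((m % 10 : Nat) : Int) ^ k.toNat + if m / 10 = 0 then 0 else digitPowSum k (m / 10)
decreasing_by exact Nat.div_lt_self (Nat.pos_of_ne_zero (by omega)) (by norm_num)

theorem digitPowSum_eq (k : Int) (m : Nat) :
    digitPowSum k m = ((m % 10 : Nat) : Int) ^ k.toNat + if m / 10 = 0 then 0 else digitPowSum k (m / 10) := by
  rw [digitPowSum]

theorem digitChar_toNat (d : Nat) (h : d < 10) : (Nat.digitChar d).toNat = d + 48 := by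
  interval_cases d <;> rfl

theorem zbirLoop_eq (k : Int) (fuel : Nat) : ∀ (n zbir : Int), 0 ≤ n → n < fuel →
    zbirLoop k fuel n zbir = zbir + digitPowSum k n.toNat := by
  induction fuel with
  | zero => intro n zbir h1 h2; omega
  | succ fuel ih =>
    intro n zbir h1 h2
    have hmod : PySem.Int.mod n 10 = ((n.toNat % 10 : Nat) : Int) := by
      simp only [PySem.Int.mod, Int.fmod_eq_emod]
      norm_num
      omega
    have hdiv : PySem.Int.floordiv n 10 = ((n.toNat / 10 : Nat) : Int) := by
      simp only [PySem.Int.floordiv, Int.fdiv_eq_ediv]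
      norm_num
      omega
    rw [zbirLoop, hmod, hdiv]
    by_cases h0 : n.toNat / 10 = 0
    · simp only [h0, Nat.cast_zero, if_pos]
      conv_rhs => rw [digitPowSum_eq]
      rw [if_pos h0]
      push_cast; ring
    · have hne : ((n.toNat / 10 : Nat) : Int) ≠ 0 := by exact_mod_cast h0
      simp only [if_neg hne]
      rw [ih _ _ (by positivity) (by
        have : n.toNat / 10 < n.toNat := Nat.div_lt_self (by omega) (by norm_num)
        omega)]
      rw [show (((n.toNat / 10 : Nat) : Int)).toNat = n.toNat / 10 by omega]
      conv_rhs => rw [digitPowSum_eq]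
      rw [if_neg h0]
      push_cast; ring

theorem toDigitsCore_sum (k : Int) (fuel : Nat) : ∀ (m : Nat) (acc : List Char), m < fuel →
    ((Nat.toDigitsCore 10 fuel m acc).map (fun c => ((c.toNat : Int) - 48) ^ k.toNat)).sum
      = digitPowSum k m + ((acc.map (fun c => ((c.toNat : Int) - 48) ^ k.toNat)).sum) := by
  induction fuel with
  | zero => intro m acc h; omega
  | succ fuel ih =>
    intro m acc h
    have hd : (((m % 10).digitChar.toNat : Int) - 48) ^ k.toNat = ((m % 10 : Nat) : Int) ^ k.toNat := by
      rw [digitChar_toNat _ (Nat.mod_lt _ (by norm_num))]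
      push_cast; ring_nf
    rw [show Nat.toDigitsCore 10 (fuel + 1) m acc
        = (if m / 10 = 0 then (m % 10).digitChar :: acc
           else Nat.toDigitsCore 10 fuel (m / 10) ((m % 10).digitChar :: acc)) from rfl]
    by_cases h0 : m / 10 = 0
    · rw [if_pos h0]
      simp only [List.map_cons, List.sum_cons, hd]
      rw [digitPowSum_eq, if_pos h0]
      ring
    · rw [if_neg h0]
      rw [ih _ _ (by
        have : m / 10 < m := Nat.div_lt_self (by omega) (by norm_num)
        omega)]
      simp only [List.map_cons, List.sum_cons, hd]
      conv_rhs => rw [digitPowSum_eq]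
      rw [if_neg h0]
      ring

-- ===== VERDICT (by name: the statement is the Claim_ definition above) =====
theorem zbir_nekog_stepena_cifara_spec : Claim_equal_zbir_nekog_stepena_cifara := by
  intro n k _ hpre
  have hn : 0 ≤ n := hpre.1
  unfold Spec_zbir_nekog_stepena_cifara
  unfold zbir_nekog_stepena_cifara zbir_nekog_stepena_cifara_alt
  rw [PySem.Int.toList_toStr, PySem.Int.toChars, if_neg (by omega : ¬ n < 0), Nat.toDigits]
  rw [zbirLoop_eq k _ n 0 hn (by omega)]
  rw [toDigitsCore_sum k _ _ _ (by omega)]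
  simp
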